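-- pv_equiv track=rewrite | github.com/jk-jung/problem-solving | codewars/6kyu/6_Vowel Shifting.py | vowel_shift
-- ===== SOURCE A (Python) =====
-- def vowel_shift(s, n):
--     if not s: return s
--     v = [i for i, x in enumerate(s) if x in 'aeiouAEIOU']
--     r = ''
--     for i, x in enumerate(s):
--         j = v.index(i) if i in v else -1
--         if j != -1: r += s[v[(j - n) % len(v)]]
--         else: r += x
--     return r
-- ===== SOURCE B (Python) =====
-- def vowel_shift(s, n):
--     V = 'aeiouAEIOU'
--     L = sum(c in V for c in s)
--     if L == 0:
--         return s
--     # vowels of the doubled string, skipping (-n) % L of them, is exactly the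
--     # rotated vowel stream; consume it wherever s has a vowel
--     src = iter([c for c in s + s if c in V][(-n) % L:])
--     return ''.join(next(src) if c in V else c for c in s)
-- ===== Notes on version B (the rewrite author's own statement) =====
-- stated objective: faster
-- what changed: A scans the vowel-position list with 'i in v' and v.index for every character and does a modulo lookup per vowel; B never builds a position list or rotated array: it filters the vowels of the doubled string s+s once, drops (-n)%L of them, and streams the remainder into the vowel slots in one pass.
import Mathlib
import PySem

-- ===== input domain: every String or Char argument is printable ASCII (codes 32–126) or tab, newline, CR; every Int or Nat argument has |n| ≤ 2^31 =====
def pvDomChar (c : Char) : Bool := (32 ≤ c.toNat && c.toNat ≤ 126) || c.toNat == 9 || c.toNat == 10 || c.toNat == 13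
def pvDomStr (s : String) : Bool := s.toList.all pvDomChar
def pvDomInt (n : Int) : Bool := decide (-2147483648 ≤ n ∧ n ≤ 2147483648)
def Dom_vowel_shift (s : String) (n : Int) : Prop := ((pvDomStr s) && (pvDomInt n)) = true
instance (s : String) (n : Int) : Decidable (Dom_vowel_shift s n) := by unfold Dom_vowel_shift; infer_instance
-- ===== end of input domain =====

-- B drops A's vowel-position list and per-character index scans: it filters the vowels of
-- the doubled string s+s once, skips (-n) % L of them, and streams the rest into the vowel
-- slots in a single pass; same return value on every input.

-- `c in 'aeiouAEIOU'` for a single character = membership in its character list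
def pvVow (c : Char) : Bool := ['a','e','i','o','u','A','E','I','O','U'].contains c

-- ===== PORT A =====
-- v = [i for i, x in enumerate(s) if x in 'aeiouAEIOU']
def pvA_v (cs : List Char) : List Int :=
  ((PySem.List.enumerate cs).filter (fun p => pvVow p.2)).map (·.1)

-- one iteration of A's loop body, p = (i, x)
def pvA_body (cs : List Char) (v : List Int) (n : Int) (r : List Char) (p : Int × Char) : List Char :=
  -- j = v.index(i) if i in v else -1
  let j : Int := if v.contains p.1 then (((PySem.List.index? v p.1).getD 0 : Nat) : Int) else -1
  if j ≠ -1 then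
    -- r += s[v[(j - n) % len(v)]]   (both indices are always in range; the defaults are never used)
    r ++ [PySem.List.pyGetD cs (PySem.List.pyGetD v (PySem.Int.mod (j - n) (v.length : Int)) 0) ' ']
  else r ++ [p.2]

def vowel_shift (s : String) (n : Int) : String :=
  if s.toList = [] then s
  else
    String.ofList ((PySem.List.enumerate s.toList).foldl (pvA_body s.toList (pvA_v s.toList) n) [])

-- ===== PORT B =====
-- the join's per-character step: emit next(src) on a vowel, the char itself otherwise
-- (state = (output so far, remaining stream); next(src) never runs dry, the default is unreachable)
def pvB_body (st : List Char × List Char) (c : Char) : List Char × List Char :=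
  if pvVow c then (st.1 ++ [st.2.headD ' '], st.2.tail) else (st.1 ++ [c], st.2)

def vowel_shift_alt (s : String) (n : Int) : String :=
  -- L = sum(c in V for c in s)
  let L : Nat := s.toList.countP pvVow
  if L = 0 then s
  else
    -- src = [c for c in s + s if c in V][(-n) % L:]   (slice with a nonnegative start = drop)
    let src := ((s.toList ++ s.toList).filter pvVow).drop (PySem.Int.mod (-n) (L : Int)).toNat
    String.ofList ((s.toList.foldl pvB_body ([], src)).1)

-- ===== PRECONDITION & SPEC =====
def Spec_vowel_shift (s : String) (n : Int) (out : String) : Prop := out = vowel_shift_alt s n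
instance (s : String) (n : Int) (out : String) : Decidable (Spec_vowel_shift s n out) := by unfold Spec_vowel_shift; infer_instance

-- ===== CLAIM (what is proved, stated in full; the proofs are below) =====
def Claim_equal_vowel_shift : Prop := ∀ (s : String) (n : Int), Dom_vowel_shift s n → Spec_vowel_shift s n (vowel_shift s n)

-- ===== LEMMAS AND PROOFS =====

-- the positions of the vowels of a list, starting at index i
def pvPos : List Char → Int → List Int
  | [], _ => []
  | c :: t, i => if pvVow c then i :: pvPos t (i + 1) else pvPos t (i + 1)

-- common reference: the output characters, k = number of vowels already emitted
def pvRef (n : Int) (vw : List Char) : List Char → Nat → List Char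
  | [], _ => []
  | c :: t, k =>
    if pvVow c then
      PySem.List.pyGetD vw (PySem.Int.mod ((k : Int) - n) (vw.length : Int)) ' ' :: pvRef n vw t (k + 1)
    else c :: pvRef n vw t k

-- the character A's loop appends for the pair p
def pvA_char (cs : List Char) (v : List Int) (n : Int) (p : Int × Char) : Char :=
  let j : Int := if v.contains p.1 then (((PySem.List.index? v p.1).getD 0 : Nat) : Int) else -1
  if j ≠ -1 then
    PySem.List.pyGetD cs (PySem.List.pyGetD v (PySem.Int.mod (j - n) (v.length : Int)) 0) ' '
  else p.2

lemma pvA_body_eq (cs : List Char) (v : List Int) (n : Int) :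
    pvA_body cs v n = fun r p => r ++ [pvA_char cs v n p] := by
  funext r p
  unfold pvA_body pvA_char
  split <;> rfl

lemma pvPos_append (p t : List Char) (i : Int) :
    pvPos (p ++ t) i = pvPos p i ++ pvPos t (i + p.length) := by
  induction p generalizing i with
  | nil => simp [pvPos]
  | cons c p ih => by_cases h : pvVow c <;> simp [pvPos, h, ih] <;> ring_nf

lemma mem_pvPos (t : List Char) (i j : Int) (h : j ∈ pvPos t i) : i ≤ j ∧ j < i + t.length := by
  induction t generalizing i with
  | nil => simp [pvPos] at h
  | cons c t ih =>
    by_cases hc : pvVow c <;> simp only [pvPos, hc, if_pos, if_neg, Bool.false_eq_true,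
      not_false_iff, List.mem_cons, List.length_cons] at h ⊢
    · rcases h with rfl | h2
      · push_cast; omega
      · have := ih (i + 1) h2; push_cast at this ⊢; omega
    · have := ih (i + 1) h; push_cast at this ⊢; omega

lemma length_pvPos (t : List Char) (i : Int) :
    (pvPos t i).length = (t.filter pvVow).length := by
  induction t generalizing i with
  | nil => simp [pvPos]
  | cons c t ih => by_cases hc : pvVow c <;> simp [pvPos, hc, ih]

lemma pvPos_eq_enum (t : List Char) (i : Int) :
    ((PySem.List.enumerate t i).filter (fun p => pvVow p.2)).map (·.1) = pvPos t i := by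
  induction t generalizing i with
  | nil => simp [pvPos, PySem.List.enumerate_nil]
  | cons c t ih =>
    by_cases hc : pvVow c <;> simp [PySem.List.enumerate_cons, hc, ih, pvPos]

lemma map_get_pvPos (t : List Char) : ∀ pre : List Char,
    (pvPos t (pre.length : Int)).map (fun j => PySem.List.pyGetD (pre ++ t) j ' ')
      = t.filter pvVow := by
  induction t with
  | nil => intro pre; simp [pvPos]
  | cons c t ih =>
    intro pre
    have hhead : PySem.List.pyGetD (pre ++ c :: t) ((pre.length : Nat) : Int) ' ' = c := by
      rw [PySem.List.pyGetD_natCast]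
      simp [List.getD]
    have htail : (pvPos t ((pre.length : Int) + 1)).map
        (fun j => PySem.List.pyGetD (pre ++ c :: t) j ' ') = t.filter pvVow := by
      have h1 : (pre.length : Int) + 1 = (((pre ++ [c]).length : Nat) : Int) := by simp
      have h2 : pre ++ c :: t = (pre ++ [c]) ++ t := by simp
      rw [h1, h2]
      exact ih (pre ++ [c])
    by_cases hc : pvVow c <;> simp [pvPos, hc, hhead, htail]

-- position pre.length is in the vowel-position list iff c is a vowel
lemma pvAmem_pos (pre suf : List Char) (c : Char) (hc : pvVow c = true) :
    ((pre.length : Nat) : Int) ∈ pvPos (pre ++ c :: suf) 0 := by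
  rw [show (0 : Int) = ((([] : List Char).length : Nat) : Int) by simp] at *
  rw [show ((([] : List Char).length : Nat) : Int) = (0 : Int) by simp, pvPos_append]
  simp [pvPos, hc]

lemma pvAmem_neg (pre suf : List Char) (c : Char) (hc : pvVow c = false) :
    ¬ (((pre.length : Nat) : Int) ∈ pvPos (pre ++ c :: suf) 0) := by
  rw [pvPos_append]
  intro hmem
  rcases List.mem_append.1 hmem with h | h
  · have := mem_pvPos pre 0 _ h; omega
  · rw [show (0 : Int) + (pre.length : Nat) = ((pre.length : Nat) : Int) by ring] at h
    simp only [pvPos, hc, Bool.false_eq_true, if_neg, not_false_iff] at h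
    have := mem_pvPos suf _ _ h
    omega

lemma pvAidx (pre suf : List Char) (c : Char) (hc : pvVow c = true) :
    PySem.List.index? (pvPos (pre ++ c :: suf) 0) ((pre.length : Nat) : Int)
      = some (pre.filter pvVow).length := by
  have hnotpre : ((pre.length : Nat) : Int) ∉ pvPos pre 0 := by
    intro hmem
    have := mem_pvPos pre 0 _ hmem
    omega
  rw [PySem.List.index?_eq_some_iff]
  refine ⟨pvPos pre 0, pvPos suf (((pre.length : Nat) : Int) + 1), ?_, length_pvPos pre 0, hnotpre⟩
  rw [pvPos_append]
  simp [pvPos, hc]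

-- A's looked-up character at vowel rank k is the k-rotated vowel
lemma pvAhead (cs : List Char) (n : Int) (k : Nat) (hk : k < (cs.filter pvVow).length) :
    PySem.List.pyGetD cs
        (PySem.List.pyGetD (pvPos cs 0)
          (PySem.Int.mod ((k : Int) - n) (((pvPos cs 0).length : Nat) : Int)) 0) ' '
      = PySem.List.pyGetD (cs.filter pvVow)
          (PySem.Int.mod ((k : Int) - n) (((cs.filter pvVow).length : Nat) : Int)) ' ' := by
  have hlen : (pvPos cs 0).length = (cs.filter pvVow).length := length_pvPos cs 0
  have hLpos : (0 : Int) < ((cs.filter pvVow).length : Int) := by omega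
  set m : Int := PySem.Int.mod ((k : Int) - n) (((cs.filter pvVow).length : Nat) : Int) with hm
  have hm0 : 0 ≤ m := PySem.Int.mod_nonneg _ hLpos
  have hmlt : m < ((cs.filter pvVow).length : Int) := PySem.Int.mod_lt _ hLpos
  have hmap : (pvPos cs 0).map (fun j => PySem.List.pyGetD cs j ' ') = cs.filter pvVow := by
    simpa using map_get_pvPos cs []
  rw [hlen]
  have hmN : m.toNat < (pvPos cs 0).length := by omega
  have h1 : PySem.List.pyGetD (pvPos cs 0) m 0 = (pvPos cs 0)[m.toNat]'hmN :=
    PySem.List.pyGetD_eq_getElem (pvPos cs 0) 0 hm0 (by omega)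
  have h2 : PySem.List.pyGetD (cs.filter pvVow) m ' '
      = (cs.filter pvVow)[m.toNat]'(by omega) :=
    PySem.List.pyGetD_eq_getElem (cs.filter pvVow) ' ' hm0 hmlt
  rw [h1, h2]
  have h3 : PySem.List.pyGetD cs ((pvPos cs 0)[m.toNat]'hmN) ' '
      = ((pvPos cs 0).map (fun j => PySem.List.pyGetD cs j ' '))[m.toNat]'(by simpa using hmN) := by
    simp
  rw [h3]
  simp [hmap]

-- A's loop over the suffix equals the reference
lemma pvLA (n : Int) (cs : List Char) : ∀ (suf pre : List Char), cs = pre ++ suf →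
    (PySem.List.enumerate suf ((pre.length : Nat) : Int)).map (pvA_char cs (pvPos cs 0) n)
      = pvRef n (cs.filter pvVow) suf (pre.filter pvVow).length := by
  intro suf
  induction suf with
  | nil => intro pre _; simp [pvRef, PySem.List.enumerate_nil]
  | cons c suf ih =>
    intro pre hsplit
    subst hsplit
    rw [PySem.List.enumerate_cons, List.map_cons]
    have hlen : ((pre.length : Nat) : Int) + 1 = (((pre ++ [c]).length : Nat) : Int) := by simp
    have happ : pre ++ c :: suf = (pre ++ [c]) ++ suf := by simp
    have htail := ih (pre ++ [c]) happ
    by_cases hc : pvVow c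
    · have hrank : (pre.filter pvVow).length < ((pre ++ c :: suf).filter pvVow).length := by
        simp [hc]
      have hne : (((pre.filter pvVow).length : Nat) : Int) ≠ -1 := by omega
      have hh := pvAhead (pre ++ c :: suf) n (pre.filter pvVow).length hrank
      simp only [pvRef, hc, if_true]
      congr 1
      · have hidx : List.idxOf? ((pre.length : Nat) : Int) (pvPos (pre ++ c :: suf) 0)
            = some (pre.filter pvVow).length := by
          rw [← PySem.List.index?_eq_idxOf?]
          exact pvAidx pre suf c hc
        simp [pvA_char, pvAmem_pos pre suf c hc, hidx, hne]
        simp at hh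
        exact hh
      · rw [hlen, htail]
        congr 1
        simp [hc]
    · have hc' : pvVow c = false := by simpa using hc
      simp only [pvRef, hc', Bool.false_eq_true, if_neg, not_false_iff]
      congr 1
      · simp [pvA_char, pvAmem_neg pre suf c hc']
      · rw [hlen, htail]
        congr 1
        simp [hc']

-- the head of the doubled vowel list dropped m (m < 2L) is the (m mod L)-th vowel
lemma pvDoubledHead (vw : List Char) (m : Nat) (hL : 0 < vw.length) (hm : m < 2 * vw.length) :
    ((vw ++ vw).drop m).headD ' ' = vw[m % vw.length]'(Nat.mod_lt _ hL) := by
  have h2 : m < (vw ++ vw).length := by simp; omega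
  have h1 : ((vw ++ vw).drop m).headD ' ' = (vw ++ vw)[m]'h2 := by
    rw [List.headD_eq_head?_getD, List.head?_drop]
    simp [List.getElem?_eq_getElem h2]
  rw [h1]
  by_cases hlt : m < vw.length
  · rw [List.getElem_append_left hlt]
    congr 1
    exact (Nat.mod_eq_of_lt hlt).symm
  · have hge : vw.length ≤ m := by omega
    rw [List.getElem_append_right hge]
    congr 1
    rw [Nat.mod_eq_sub_mod hge]
    exact (Nat.mod_eq_of_lt (by omega)).symm

-- the stream index k + j reproduces pvRef's modulo lookup (k = (-n) mod L)
lemma pvStreamHead (vw : List Char) (n : Int) (j : Nat) (hL : 0 < vw.length)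
    (hj : j < vw.length) :
    ((vw ++ vw).drop ((PySem.Int.mod (-n) (vw.length : Int)).toNat + j)).headD ' '
      = PySem.List.pyGetD vw (PySem.Int.mod ((j : Int) - n) (vw.length : Int)) ' ' := by
  have hLpos : (0 : Int) < (vw.length : Int) := by omega
  have hLne : (vw.length : Int) ≠ 0 := by omega
  have hke : PySem.Int.mod (-n) (vw.length : Int) = (-n) % (vw.length : Int) :=
    PySem.Int.mod_eq_emod_of_pos hLpos
  have hre : PySem.Int.mod ((j : Int) - n) (vw.length : Int)
      = ((j : Int) - n) % (vw.length : Int) := PySem.Int.mod_eq_emod_of_pos hLpos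
  set k : Nat := (PySem.Int.mod (-n) (vw.length : Int)).toNat with hk
  have hk0 : 0 ≤ PySem.Int.mod (-n) (vw.length : Int) := PySem.Int.mod_nonneg _ hLpos
  have hklt : PySem.Int.mod (-n) (vw.length : Int) < (vw.length : Int) :=
    PySem.Int.mod_lt _ hLpos
  have hkc : (k : Int) = (-n) % (vw.length : Int) := by
    rw [hk, Int.toNat_of_nonneg hk0, hke]
  have hm2 : k + j < 2 * vw.length := by omega
  rw [pvDoubledHead vw (k + j) hL hm2]
  set r : Int := PySem.Int.mod ((j : Int) - n) (vw.length : Int) with hr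
  have hr0 : 0 ≤ r := PySem.Int.mod_nonneg _ hLpos
  have hrlt : r < (vw.length : Int) := PySem.Int.mod_lt _ hLpos
  have hrg : PySem.List.pyGetD vw r ' ' = vw[r.toNat]'(by omega) :=
    PySem.List.pyGetD_eq_getElem vw ' ' hr0 hrlt
  rw [hrg]
  congr 1
  -- (k + j) % L = ((j - n) % L).toNat
  have hcong : (((k + j) % vw.length : Nat) : Int) = ((j : Int) - n) % (vw.length : Int) := by
    push_cast
    rw [hkc, Int.add_emod, Int.emod_emod_of_dvd _ dvd_rfl, ← Int.add_emod]
    congr 1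
    ring
  omega

-- B's loop equals the reference: state invariant = the stream dropped (k + vowels consumed)
lemma pvLB (n : Int) (vw : List Char) (hL : 0 < vw.length) :
    ∀ (t acc : List Char) (j : Nat), j + (t.filter pvVow).length ≤ vw.length →
    (t.foldl pvB_body
        (acc, (vw ++ vw).drop ((PySem.Int.mod (-n) (vw.length : Int)).toNat + j))).1
      = acc ++ pvRef n vw t j := by
  intro t
  induction t with
  | nil => intro acc j _; simp [pvRef]
  | cons c t ih =>
    intro acc j hj
    by_cases hc : pvVow c
    · have hjlt : j < vw.length := by simp [hc] at hj; omega
      rw [List.foldl_cons]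
      have hbody : pvB_body (acc, (vw ++ vw).drop ((PySem.Int.mod (-n) (vw.length : Int)).toNat + j)) c
          = (acc ++ [PySem.List.pyGetD vw (PySem.Int.mod ((j : Int) - n) (vw.length : Int)) ' '],
             (vw ++ vw).drop ((PySem.Int.mod (-n) (vw.length : Int)).toNat + (j + 1))) := by
        simp only [pvB_body, hc, if_true]
        rw [pvStreamHead vw n j hL hjlt, List.tail_drop, Nat.add_assoc]
      rw [hbody, ih _ (j + 1) (by simp [hc] at hj ⊢; omega)]
      simp [pvRef, hc]
    · have hc' : pvVow c = false := by simpa using hc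
      rw [List.foldl_cons]
      have hbody : pvB_body (acc, (vw ++ vw).drop ((PySem.Int.mod (-n) (vw.length : Int)).toNat + j)) c
          = (acc ++ [c], (vw ++ vw).drop ((PySem.Int.mod (-n) (vw.length : Int)).toNat + j)) := by
        simp [pvB_body, hc']
      rw [hbody, ih _ j (by simp [hc'] at hj; omega)]
      simp [pvRef, hc']

-- ===== VERDICT (by name: the statement is the Claim_ definition above) =====
theorem vowel_shift_spec : Claim_equal_vowel_shift := by
  intro s n _
  unfold Spec_vowel_shift vowel_shift vowel_shift_alt
  have hcount : s.toList.countP pvVow = (s.toList.filter pvVow).length := by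
    simp [List.countP_eq_length_filter]
  by_cases hnil : s.toList = []
  · simp [hnil]
  · rw [if_neg hnil]
    by_cases hvw : (s.toList.filter pvVow).length = 0
    · rw [if_pos (by rw [hcount]; exact hvw)]
      have hpos : pvPos s.toList 0 = [] :=
        List.eq_nil_of_length_eq_zero (by rw [length_pvPos]; exact hvw)
      have hv : pvA_v s.toList = [] := by
        unfold pvA_v; rw [pvPos_eq_enum, hpos]
      rw [hv]
      have hbody : pvA_body s.toList [] n = fun r p => r ++ [p.2] := by
        funext r p; simp [pvA_body]
      rw [hbody, PySem.List.foldl_append_singleton_eq_map, List.nil_append,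
        PySem.List.map_snd_enumerate]
      simp
    · rw [if_neg (by rw [hcount]; exact hvw)]
      have hveq : pvA_v s.toList = pvPos s.toList 0 := by
        unfold pvA_v; rw [pvPos_eq_enum]
      rw [hveq, pvA_body_eq, PySem.List.foldl_append_singleton_eq_map, List.nil_append]
      have hA := pvLA n s.toList s.toList [] rfl
      simp only [List.length_nil, Nat.cast_zero, List.filter_nil, List.length_nil] at hA
      have hfilt : (s.toList ++ s.toList).filter pvVow
          = s.toList.filter pvVow ++ s.toList.filter pvVow := by simp
      have hB := pvLB n (s.toList.filter pvVow) (by omega) s.toList [] 0 (by simp)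
      simp only [Nat.add_zero, List.nil_append] at hB
      rw [hA]
      congr 1
      rw [← hB]
      congr 2
      rw [hfilt, hcount]
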